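-- pv_equiv track=rewrite | github.com/Zenith9320/MyCPU | src/main.py | convert_to_hex_format
-- ===== SOURCE A (Python) =====
-- def convert_to_hex_format(memory):
--     # 指令替换映射（停机指令转换）
--     INSTRUCTION_REPLACEMENTS = {
--         0x0ff00513: 0xfe000fa3,  # addi a0, zero, -1 -> c.sw zero, -8(sp)
--     }
--
--     # 找到最小和最大地址
--     if not memory:
--         return []
--
--     min_addr = min(memory.keys())
--     max_addr = max(memory.keys())
--
--     # 按字对齐（4字节）
--     min_addr = min_addr & ~0x3
--     max_addr = (max_addr + 3) & ~0x3
--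
--     # 生成32位字列表
--     words = []
--     for addr in range(min_addr, max_addr, 4):
--         # 小端序：低字节在低地址
--         word = 0
--         for i in range(4):
--             byte_addr = addr + i
--             if byte_addr in memory:
--                 word |= (memory[byte_addr] & 0xFF) << (i * 8)
--
--         # 应用指令替换
--         if word in INSTRUCTION_REPLACEMENTS:
--             word = INSTRUCTION_REPLACEMENTS[word]
--
--         words.append((addr, word))
--
--     return words
-- ===== SOURCE B (Python) =====
-- def convert_to_hex_format(memory):
--     # One pass scatters each byte into a word table; then one lookup per word.
--     INSTRUCTION_REPLACEMENTS = {
--         0x0ff00513: 0xfe000fa3,  # addi a0, zero, -1 -> c.sw zero, -8(sp)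
--     }
--
--     if not memory:
--         return []
--
--     table = {}
--     for byte_addr, val in memory.items():
--         word_addr = byte_addr & ~0x3
--         table[word_addr] = table.get(word_addr, 0) | ((val & 0xFF) << ((byte_addr & 3) * 8))
--
--     min_addr = min(memory.keys()) & ~0x3
--     max_addr = (max(memory.keys()) + 3) & ~0x3
--
--     words = []
--     for addr in range(min_addr, max_addr, 4):
--         word = table.get(addr, 0)
--         words.append((addr, INSTRUCTION_REPLACEMENTS.get(word, word)))
--     return words
-- ===== Notes on version B (the rewrite author's own statement) =====
-- stated objective: alternative
-- what changed: B assembles words by a single scatter pass over memory.items() (OR-ing each byte into a word-indexed table) and then does one table lookup per word, instead of A's four per-word membership probes into the byte dict.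
import Mathlib
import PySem

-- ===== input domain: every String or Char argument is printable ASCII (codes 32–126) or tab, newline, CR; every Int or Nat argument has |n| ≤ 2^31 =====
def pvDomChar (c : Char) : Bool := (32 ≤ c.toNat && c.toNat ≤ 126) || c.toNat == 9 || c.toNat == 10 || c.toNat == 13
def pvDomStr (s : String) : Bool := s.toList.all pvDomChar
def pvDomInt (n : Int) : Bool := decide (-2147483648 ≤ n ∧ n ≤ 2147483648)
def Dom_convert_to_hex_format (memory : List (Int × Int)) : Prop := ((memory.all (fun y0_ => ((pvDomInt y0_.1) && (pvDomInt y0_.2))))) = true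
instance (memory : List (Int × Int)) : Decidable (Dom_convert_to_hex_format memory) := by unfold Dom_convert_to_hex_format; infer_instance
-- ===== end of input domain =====

-- B builds the word table in one scatter pass over the memory items instead of probing
-- four byte addresses per word (objective: alternative; equal asymptotic cost).
-- The dict argument is modelled as an association list folded into a PySem.Dict
-- (last value wins, first position kept), exactly as Python's dict would hold it.

-- ===== PORT A =====
def convert_to_hex_format (memory : List (Int × Int)) : List (Int × Int) :=
  if memory = [] then []
  else
    let d : PySem.Dict Int Int :=
      memory.foldl (fun d p => d.insert p.1 p.2) PySem.Dict.empty
    let min0 : Int := (PySem.List.min? d.keys (fun x => x)).getD 0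
    let max0 : Int := (PySem.List.max? d.keys (fun x => x)).getD 0
    let min_addr := PySem.Int.band min0 (-4)
    let max_addr := PySem.Int.band (max0 + 3) (-4)
    (PySem.List.pyRange min_addr max_addr 4).foldl
      (fun words addr =>
        let word : Int :=
          (PySem.List.pyRange 0 4 1).foldl
            (fun word i =>
              match d.get? (addr + i) with
              | some v => PySem.Int.bor word ((PySem.Int.band v 255) <<< (i * 8).toNat)
              | none => word) 0
        -- 'if word in INSTRUCTION_REPLACEMENTS: word = INSTRUCTION_REPLACEMENTS[word]' (single-entry literal dict)
        words ++ [(addr, if word = 0x0ff00513 then 0xfe000fa3 else word)]) []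

-- ===== PORT B =====
def convert_to_hex_format_alt (memory : List (Int × Int)) : List (Int × Int) :=
  if memory = [] then []
  else
    let d : PySem.Dict Int Int :=
      memory.foldl (fun d p => d.insert p.1 p.2) PySem.Dict.empty
    let table : PySem.Dict Int Int :=
      d.items.foldl
        (fun t p =>
          let word_addr := PySem.Int.band p.1 (-4)
          t.insert word_addr
            (PySem.Int.bor (t.getD word_addr 0)
              ((PySem.Int.band p.2 255) <<< ((PySem.Int.band p.1 3).toNat * 8))))
        PySem.Dict.empty
    let min_addr := PySem.Int.band ((PySem.List.min? d.keys (fun x => x)).getD 0) (-4)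
    let max_addr := PySem.Int.band ((PySem.List.max? d.keys (fun x => x)).getD 0 + 3) (-4)
    (PySem.List.pyRange min_addr max_addr 4).foldl
      (fun words addr =>
        let word := table.getD addr 0
        -- 'INSTRUCTION_REPLACEMENTS.get(word, word)' (single-entry literal dict)
        words ++ [(addr, if word = 0x0ff00513 then 0xfe000fa3 else word)]) []

-- ===== PRECONDITION & SPEC =====
def Spec_convert_to_hex_format (memory : List (Int × Int)) (out : List (Int × Int)) : Prop := out = convert_to_hex_format_alt memory
instance (memory : List (Int × Int)) (out : List (Int × Int)) : Decidable (Spec_convert_to_hex_format memory out) := by unfold Spec_convert_to_hex_format; infer_instance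

-- ===== CLAIM (what is proved, stated in full; the proofs are below) =====
def Claim_equal_convert_to_hex_format : Prop := ∀ (memory : List (Int × Int)), Dom_convert_to_hex_format memory → Spec_convert_to_hex_format memory (convert_to_hex_format memory)

-- ===== LEMMAS AND PROOFS =====

theorem pv_band_three (k : Int) : PySem.Int.band k 3 = k % 4 := by
  simp only [PySem.Int.band]
  have e3 : (3 : Int).toNat = 3 := rfl
  split_ifs with h1 h2 h2 <;> try omega
  · have h : k.toNat &&& 3 = k.toNat % 4 := Nat.and_two_pow_sub_one_eq_mod _ 2
    rw [e3, h]
    omega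
  · have h : (-k - 1).toNat &&& 3 = (-k - 1).toNat % 4 := Nat.and_two_pow_sub_one_eq_mod _ 2
    rw [e3, Nat.and_comm, h]
    omega

theorem pv_band_neg4 (k : Int) : PySem.Int.band k (-4) = k - k % 4 := by
  simp only [PySem.Int.band]
  have e3 : (-(-4 : Int) - 1).toNat = 3 := rfl
  split_ifs with h1 h2 h2 <;> try omega
  · have h : k.toNat &&& 3 = k.toNat % 4 := Nat.and_two_pow_sub_one_eq_mod _ 2
    rw [e3, h]
    omega
  · rw [e3]
    set m := (-k - 1).toNat with hm
    have hor : m ||| 3 = 4 * (m / 4) + 3 := by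
      have h4 : m % 4 ||| 3 = 3 := by
        have hlt : m % 4 < 4 := Nat.mod_lt _ (by norm_num)
        interval_cases h : m % 4 <;> rfl
      calc m ||| 3 = ((m / 4) <<< 2 + m % 4) ||| 3 := by
              rw [Nat.shiftLeft_eq]; congr 1; omega
        _ = ((m / 4) <<< 2 ||| m % 4) ||| 3 := by
              rw [Nat.shiftLeft_add_eq_or_of_lt (by omega)]
        _ = (m / 4) <<< 2 ||| (m % 4 ||| 3) := Nat.lor_assoc _ _ _
        _ = (m / 4) <<< 2 ||| 3 := by rw [h4]
        _ = (m / 4) <<< 2 + 3 := ((Nat.shiftLeft_add_eq_or_of_lt (b := 3) (i := 2) (by norm_num)) ((m / 4))).symm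
        _ = 4 * (m / 4) + 3 := by rw [Nat.shiftLeft_eq]; ring
    omega

def pvSlot (d : PySem.Dict Int Int) (k : Int) (s : Nat) : Nat :=
  match d.get? k with
  | some v => (PySem.Int.band v 255).toNat <<< s
  | none => 0

def pvWord (d : PySem.Dict Int Int) (a : Int) : Nat :=
  pvSlot d a 0 ||| pvSlot d (a + 1) 8 ||| pvSlot d (a + 2) 16 ||| pvSlot d (a + 3) 24

theorem pv_stepA_eq (d : PySem.Dict Int Int) (w : Int) (hw : 0 ≤ w) (k : Int) (s : Nat) :
    (match d.get? k with
     | some v => PySem.Int.bor w ((PySem.Int.band v 255) <<< s)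
     | none => w) = ((w.toNat ||| pvSlot d k s : Nat) : Int) := by
  unfold pvSlot
  cases hg : d.get? k with
  | none => simp [Int.toNat_of_nonneg hw]
  | some v =>
    have hb : 0 ≤ PySem.Int.band v 255 := by
      rw [PySem.Int.band_comm]; exact PySem.Int.band_nonneg_of_nonneg_left _ (by norm_num)
    have hsh : (PySem.Int.band v 255) <<< s = (((PySem.Int.band v 255).toNat <<< s : Nat) : Int) := by
      rw [Int.shiftLeft_eq, Nat.shiftLeft_eq]
      push_cast [Int.toNat_of_nonneg hb]
      ring
    simp only []
    rw [hsh, PySem.Int.bor_of_nonneg hw (Int.natCast_nonneg _)]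
    simp only [Int.toNat_natCast]

theorem pv_wordA_eq (d : PySem.Dict Int Int) (a : Int) :
    ((PySem.List.pyRange 0 4 1).foldl (fun word i =>
        match d.get? (a + i) with
        | some v => PySem.Int.bor word ((PySem.Int.band v 255) <<< (i * 8).toNat)
        | none => word) 0) = ((pvWord d a : Nat) : Int) := by
  have hr : PySem.List.pyRange 0 4 1 = [0, 1, 2, 3] := by decide
  rw [hr]
  simp only [List.foldl_cons, List.foldl_nil]
  rw [pv_stepA_eq d 0 le_rfl, pv_stepA_eq d _ (Int.natCast_nonneg _),
      pv_stepA_eq d _ (Int.natCast_nonneg _), pv_stepA_eq d _ (Int.natCast_nonneg _)]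
  norm_num [pvWord]
  rw [show ((8:Int).toNat) = 8 from rfl, show ((16:Int).toNat) = 16 from rfl, show ((24:Int).toNat) = 24 from rfl]

def pvContrib : List (Int × Int) → Int → Nat
  | [], _ => 0
  | p :: rest, a =>
      (if PySem.Int.band p.1 (-4) = a then
        (PySem.Int.band p.2 255).toNat <<< ((PySem.Int.band p.1 3).toNat * 8)
      else 0) ||| pvContrib rest a


theorem pv_slot_cons (k : Int) (v : Int) (rest : List (Int × Int)) (x : Int) (s : Nat) :
    pvSlot ⟨(k, v) :: rest⟩ x s
      = if k = x then (PySem.Int.band v 255).toNat <<< s else pvSlot ⟨rest⟩ x s := by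
  unfold pvSlot
  rw [PySem.Dict.get?_mk_cons]
  by_cases h : k = x <;> simp [h]

theorem pv_slot_none (rest : List (Int × Int)) (x : Int) (s : Nat)
    (h : (PySem.Dict.mk rest).get? x = none) : pvSlot ⟨rest⟩ x s = 0 := by
  unfold pvSlot; rw [h]


theorem pv_lor_left_comm (a b c : Nat) : a ||| (b ||| c) = b ||| (a ||| c) := by
  rw [← Nat.lor_assoc, Nat.lor_comm a b, Nat.lor_assoc]

theorem pv_ins0 (c x1 x2 x3 : Nat) : c ||| (0 ||| x1 ||| x2 ||| x3) = c ||| x1 ||| x2 ||| x3 := by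
  simp [Nat.lor_assoc]

theorem pv_ins1 (c x0 x2 x3 : Nat) : c ||| (x0 ||| 0 ||| x2 ||| x3) = x0 ||| c ||| x2 ||| x3 := by
  simp only [Nat.or_zero]
  simp only [Nat.lor_assoc]
  rw [pv_lor_left_comm]

theorem pv_ins2 (c x0 x1 x3 : Nat) : c ||| (x0 ||| x1 ||| 0 ||| x3) = x0 ||| x1 ||| c ||| x3 := by
  simp only [Nat.or_zero]
  simp only [Nat.lor_assoc]
  rw [pv_lor_left_comm c x0, pv_lor_left_comm c x1]

theorem pv_ins3 (c x0 x1 x2 : Nat) : c ||| (x0 ||| x1 ||| x2 ||| 0) = x0 ||| x1 ||| x2 ||| c := by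
  simp only [Nat.or_zero]
  simp only [Nat.lor_assoc]
  rw [pv_lor_left_comm c x0, pv_lor_left_comm c x1, Nat.lor_comm c x2]

theorem pv_contrib_slots : ∀ (L : List (Int × Int)), (L.map Prod.fst).Nodup → ∀ a : Int, (4 : Int) ∣ a →
    pvContrib L a = pvWord ⟨L⟩ a := by
  intro L
  induction L with
  | nil =>
    intro _ a _
    simp [pvContrib, pvWord, pvSlot, PySem.Dict.get?]
  | cons p rest ih =>
    intro hnd a ha
    obtain ⟨k, v⟩ := p
    simp only [List.map_cons, List.nodup_cons, List.mem_map] at hnd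
    have hnone : (PySem.Dict.mk rest).get? k = none := by
      rw [PySem.Dict.get?_eq_none_iff_not_mem_keys]
      simp only [PySem.Dict.keys_mk]
      intro hc
      rcases List.mem_map.mp hc with ⟨q, hq, hqe⟩
      exact hnd.1 ⟨q, hq, hqe⟩
    have hrest := ih hnd.2 a ha
    simp only [pvContrib, pvWord, pv_slot_cons, hrest]
    by_cases hb : PySem.Int.band k (-4) = a
    · have hb' := hb
      rw [pv_band_neg4] at hb'
      have hr4 : k % 4 = 0 ∨ k % 4 = 1 ∨ k % 4 = 2 ∨ k % 4 = 3 := by omega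
      rw [if_pos hb]
      rcases hr4 with h | h | h | h
      · have hky : k = a := by omega
        have hs : (PySem.Int.band k 3).toNat * 8 = 0 := by rw [pv_band_three]; omega
        have hnone' : (PySem.Dict.mk rest).get? a = none := hky ▸ hnone
        rw [if_pos hky, if_neg (by omega), if_neg (by omega), if_neg (by omega),
            hs, pv_slot_none rest _ _ hnone', pv_ins0]
      · have hky : k = a + 1 := by omega
        have hs : (PySem.Int.band k 3).toNat * 8 = 8 := by rw [pv_band_three]; omega
        have hnone' : (PySem.Dict.mk rest).get? (a + 1) = none := hky ▸ hnone
        rw [if_neg (by omega), if_pos hky, if_neg (by omega), if_neg (by omega),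
            hs, pv_slot_none rest _ _ hnone', pv_ins1]
      · have hky : k = a + 2 := by omega
        have hs : (PySem.Int.band k 3).toNat * 8 = 16 := by rw [pv_band_three]; omega
        have hnone' : (PySem.Dict.mk rest).get? (a + 2) = none := hky ▸ hnone
        rw [if_neg (by omega), if_neg (by omega), if_pos hky, if_neg (by omega),
            hs, pv_slot_none rest _ _ hnone', pv_ins2]
      · have hky : k = a + 3 := by omega
        have hs : (PySem.Int.band k 3).toNat * 8 = 24 := by rw [pv_band_three]; omega
        have hnone' : (PySem.Dict.mk rest).get? (a + 3) = none := hky ▸ hnone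
        rw [if_neg (by omega), if_neg (by omega), if_neg (by omega), if_pos hky,
            hs, pv_slot_none rest _ _ hnone', pv_ins3]
    · have hb' := hb
      rw [pv_band_neg4] at hb'
      rw [if_neg hb, if_neg (by omega), if_neg (by omega), if_neg (by omega), if_neg (by omega),
          Nat.zero_or]

theorem pv_scatter : ∀ (L : List (Int × Int)) (t : PySem.Dict Int Int),
    (∀ k, 0 ≤ t.getD k 0) → ∀ a : Int,
    (L.foldl (fun t p =>
        t.insert (PySem.Int.band p.1 (-4))
          (PySem.Int.bor (t.getD (PySem.Int.band p.1 (-4)) 0)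
            ((PySem.Int.band p.2 255) <<< ((PySem.Int.band p.1 3).toNat * 8)))) t).getD a 0
      = (((t.getD a 0).toNat ||| pvContrib L a : Nat) : Int) := by
  intro L
  induction L with
  | nil =>
    intro t ht a
    simp [pvContrib, Int.toNat_of_nonneg (ht a)]
  | cons p rest ih =>
    intro t ht a
    obtain ⟨k, v⟩ := p
    simp only [List.foldl_cons]
    have hbv : 0 ≤ PySem.Int.band v 255 := by
      rw [PySem.Int.band_comm]; exact PySem.Int.band_nonneg_of_nonneg_left _ (by norm_num)
    have hsh : (PySem.Int.band v 255) <<< ((PySem.Int.band k 3).toNat * 8)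
        = (((PySem.Int.band v 255).toNat <<< ((PySem.Int.band k 3).toNat * 8) : Nat) : Int) := by
      rw [Int.shiftLeft_eq, Nat.shiftLeft_eq]
      push_cast [Int.toNat_of_nonneg hbv]
      ring
    have ht' : ∀ k', 0 ≤ (t.insert (PySem.Int.band k (-4))
        (PySem.Int.bor (t.getD (PySem.Int.band k (-4)) 0)
          ((PySem.Int.band v 255) <<< ((PySem.Int.band k 3).toNat * 8)))).getD k' 0 := by
      intro k'
      rw [PySem.Dict.getD_insert]
      split_ifs with hk'
      · rw [hsh, PySem.Int.bor_of_nonneg (ht _) (Int.natCast_nonneg _)]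
        exact Int.natCast_nonneg _
      · exact ht k'
    rw [ih _ ht' a]
    simp only [pvContrib]
    rw [PySem.Dict.getD_insert]
    by_cases hwa : PySem.Int.band k (-4) = a
    · rw [hwa, if_pos rfl, if_pos rfl, hsh,
         PySem.Int.bor_of_nonneg (ht a) (Int.natCast_nonneg _)]
      simp only [Int.toNat_natCast]
      rw [Nat.lor_assoc]
    · rw [if_neg (fun h => hwa h.symm), if_neg hwa, Nat.zero_or]

-- ===== VERDICT (by name: the statement is the Claim_ definition above) =====
theorem convert_to_hex_format_spec : Claim_equal_convert_to_hex_format := by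
  intro memory _
  unfold Spec_convert_to_hex_format convert_to_hex_format convert_to_hex_format_alt
  by_cases hm : memory = []
  · rw [if_pos hm, if_pos hm]
  · rw [if_neg hm, if_neg hm]
    simp only []
    set d : PySem.Dict Int Int :=
      memory.foldl (fun d p => d.insert p.1 p.2) PySem.Dict.empty with hd
    set min0 : Int := (PySem.List.min? d.keys (fun x => x)).getD 0 with hmin0
    have hnd : (d.items.map Prod.fst).Nodup := by
      have := PySem.Dict.nodup_keys_foldl_insert_key (ν := Int) memory
        (fun p => p.1) (fun _ p => p.2) PySem.Dict.empty PySem.Dict.nodup_keys_empty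
      exact this
    rw [PySem.List.foldl_append_singleton_eq_map, PySem.List.foldl_append_singleton_eq_map]
    simp only [List.nil_append]
    apply List.map_congr_left
    intro addr ha
    rw [PySem.List.mem_pyRange_iff_of_pos (by norm_num)] at ha
    have hb4 := pv_band_neg4 min0
    have ha4 : (4 : Int) ∣ addr := by
      obtain ⟨hle, hlt, hdvd⟩ := ha
      omega
    have hA := pv_wordA_eq d addr
    have hB := pv_scatter d.items PySem.Dict.empty
      (fun k => by rw [PySem.Dict.getD_empty]) addr
    rw [hA, hB]
    rw [PySem.Dict.getD_empty]
    simp only [Int.toNat_zero, Nat.zero_or]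
    rw [pv_contrib_slots d.items hnd addr ha4]
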